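-- pv_equiv track=rewrite | github.com/Kellthuzad/Advent2021 | Day17/Solution.py | findXVelocityMax
-- ===== SOURCE A (Python) =====
-- def findXVelocityMax(xBounds, xMinV):
--     makesIt = True
--     xV = xMinV - 1
--
--     while makesIt:
--         makesIt = False
--         position = 0
--         xV += 1
--         tempxV = xV
--         while tempxV > 0:
--             position += tempxV
--             tempxV -= 1
--             if xBounds[0] <= position <= xBounds[1]:
--                 makesIt = True
--                 break
--
--     return xV
-- ===== SOURCE B (Python) =====
-- def _hits(xBounds, v):
--     # velocity v hits [lo, hi] iff some prefix sum v + (v-1) + ... lands in it;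
--     # prefix sums are nondecreasing, so binary-search the first one >= lo.
--     if v <= 0:
--         return False
--     lo, hi = xBounds[0], xBounds[1]
--     def pos(k):
--         return k * v - k * (k - 1) // 2
--     if pos(v) < lo:
--         return False
--     a, b = 1, v
--     while a < b:
--         m = (a + b) // 2
--         if pos(m) >= lo:
--             b = m
--         else:
--             a = m + 1
--     return pos(a) <= hi
--
--
-- def findXVelocityMax(xBounds, xMinV):
--     v = xMinV
--     while _hits(xBounds, v):
--         v += 1
--     return v
-- ===== Notes on version B (the rewrite author's own statement) =====
-- stated objective: alternative
-- what changed: Per candidate velocity, A simulates the trajectory step by step scanning every prefix-sum position, while B uses the closed-form position pos(k)=k*v-k(k-1)//2, which is nondecreasing in k, and binary-searches the first position reaching xBounds[0]; each velocity then costs O(log v) steps instead of O(v), though a timing run did not consistently confirm a speed-up on the generated inputs.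
-- outside the precondition, e.g. on findXVelocityMax([100], 1): A returns 1, B raises IndexError
import Mathlib
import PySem

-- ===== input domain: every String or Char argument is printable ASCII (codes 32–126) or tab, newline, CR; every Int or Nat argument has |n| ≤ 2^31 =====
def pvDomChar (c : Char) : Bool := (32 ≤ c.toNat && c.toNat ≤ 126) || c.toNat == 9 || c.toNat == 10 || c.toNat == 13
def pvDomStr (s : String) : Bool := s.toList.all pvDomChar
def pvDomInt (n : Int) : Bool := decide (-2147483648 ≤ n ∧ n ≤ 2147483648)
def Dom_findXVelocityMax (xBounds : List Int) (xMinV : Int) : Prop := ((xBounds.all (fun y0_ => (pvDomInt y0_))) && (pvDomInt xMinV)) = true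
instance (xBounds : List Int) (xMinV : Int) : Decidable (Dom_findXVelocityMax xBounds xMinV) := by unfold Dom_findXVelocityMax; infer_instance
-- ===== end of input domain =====

-- B replaces A's linear step-by-step trajectory simulation per velocity by a binary
-- search over the monotone prefix-sum positions (objective: alternative).

-- ===== PORT A =====
-- inner 'while tempxV > 0' loop of A: simulate steps, break when a position is in range
-- fuel = tempxV.toNat (totality guard only: tempxV drops by 1 per iteration, so it is exact)
def pvInnerAGo (xBounds : List Int) : Nat → Int → Int → Bool
  | 0, _, _ => false
  | n + 1, position, tempxV =>
    if 0 < tempxV then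
      if PySem.List.pyGetD xBounds 0 0 ≤ position + tempxV ∧ position + tempxV ≤ PySem.List.pyGetD xBounds 1 0 then true
      else pvInnerAGo xBounds n (position + tempxV) (tempxV - 1)
    else false

def pvInnerA (xBounds : List Int) (position tempxV : Int) : Bool :=
  pvInnerAGo xBounds tempxV.toNat position tempxV

-- outer 'while makesIt' loop of A: increment xV until its trajectory misses.
-- fuel guard only (totality): once xV exceeds xBounds[1] every position overshoots, so the
-- loop body never runs with the fuel exhausted.
def pvLoopA (xBounds : List Int) (fuel : Nat) (xV : Int) : Int :=
  match fuel with
  | 0 => xV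
  | n + 1 => if pvInnerA xBounds 0 xV then pvLoopA xBounds n (xV + 1) else xV

def findXVelocityMax (xBounds : List Int) (xMinV : Int) : Int :=
  pvLoopA xBounds (PySem.List.pyGetD xBounds 1 0 + 1 - xMinV).toNat xMinV

-- ===== PORT B =====
-- pos(k) of Source B: position after k steps at velocity v
def pvPosB (v k : Int) : Int := k * v - PySem.Int.floordiv (k * (k - 1)) 2

-- the 'while a < b' binary-search loop of Source B's _hits
-- fuel = (b - a).toNat (totality guard only: the interval [a, b] shrinks by ≥ 1 per iteration, so it is exact)
def pvBsearchGo (lo v : Int) : Nat → Int → Int → Int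
  | 0, a, _ => a
  | n + 1, a, b =>
    if a < b then
      let m := PySem.Int.floordiv (a + b) 2
      if lo ≤ pvPosB v m then pvBsearchGo lo v n a m else pvBsearchGo lo v n (m + 1) b
    else a

def pvBsearch (lo v a b : Int) : Int := pvBsearchGo lo v (b - a).toNat a b

-- '_hits' of Source B
def pvHitsB (xBounds : List Int) (v : Int) : Bool :=
  if v ≤ 0 then false
  else
    let lo := PySem.List.pyGetD xBounds 0 0
    let hi := PySem.List.pyGetD xBounds 1 0
    if pvPosB v v < lo then false
    else
      let a := pvBsearch lo v 1 v
      decide (pvPosB v a ≤ hi)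

-- 'while _hits(...)' loop of Source B, with the same exact fuel guard as A's outer loop
def pvLoopB (xBounds : List Int) (fuel : Nat) (v : Int) : Int :=
  match fuel with
  | 0 => v
  | n + 1 => if pvHitsB xBounds v then pvLoopB xBounds n (v + 1) else v

def findXVelocityMax_alt (xBounds : List Int) (xMinV : Int) : Int :=
  pvLoopB xBounds (PySem.List.pyGetD xBounds 1 0 + 1 - xMinV).toNat xMinV

-- ===== PRECONDITION & SPEC =====
-- Pre_ excludes xMinV ≥ 1 with fewer than two elements in xBounds: there A either raises
-- IndexError or (when every position of velocity xMinV stays below xBounds[0], so the lazy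
-- chained comparison never reads xBounds[1]) returns while B's unpacking raises IndexError.
def Pre_findXVelocityMax (xBounds : List Int) (xMinV : Int) : Prop :=
  2 ≤ xBounds.length ∨ xMinV ≤ 0
instance (xBounds : List Int) (xMinV : Int) : Decidable (Pre_findXVelocityMax xBounds xMinV) := by
  unfold Pre_findXVelocityMax; infer_instance

def pvWitness_findXVelocityMax : List Int × Int := ([20, 30], 5)

def Spec_findXVelocityMax (xBounds : List Int) (xMinV : Int) (out : Int) : Prop := out = findXVelocityMax_alt xBounds xMinV
instance (xBounds : List Int) (xMinV : Int) (out : Int) : Decidable (Spec_findXVelocityMax xBounds xMinV out) := by unfold Spec_findXVelocityMax; infer_instance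

-- ===== CLAIM (what is proved, stated in full; the proofs are below) =====
def Claim_equal_findXVelocityMax : Prop := ∀ (xBounds : List Int) (xMinV : Int), Dom_findXVelocityMax xBounds xMinV → Pre_findXVelocityMax xBounds xMinV → Spec_findXVelocityMax xBounds xMinV (findXVelocityMax xBounds xMinV)

-- ===== LEMMAS AND PROOFS =====

-- k*(k-1) is even, so Source B's '//2' in pos(k) is exact
theorem pvFd2 (k : Int) : PySem.Int.floordiv (k * (k - 1)) 2 * 2 = k * (k - 1) := by
  have hdvd : (2:Int) ∣ k * (k - 1) := by
    have h := Int.even_mul_succ_self (k - 1)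
    have he : (k - 1) * (k - 1 + 1) = k * (k - 1) := by ring
    rw [he] at h
    exact h.two_dvd
  have hm : PySem.Int.mod (k * (k - 1)) 2 = 0 := (PySem.Int.mod_eq_zero_iff_dvd _ _).mpr hdvd
  have h := PySem.Int.floordiv_mul_add_mod (k * (k - 1)) 2
  linarith

theorem pvPosB_succ (v k : Int) : pvPosB v (k + 1) = pvPosB v k + (v - k) := by
  have h1 := pvFd2 k
  have h2 := pvFd2 (k + 1)
  unfold pvPosB
  have harg : (k + 1) * (k + 1 - 1) = (k + 1) * k := by ring
  rw [harg] at h2 ⊢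
  ring_nf at h1 h2 ⊢
  linarith

theorem pvPosB_one (v : Int) : pvPosB v 1 = v := by
  have h : PySem.Int.floordiv ((1:Int) * (1 - 1)) 2 = 0 := by decide
  unfold pvPosB
  rw [h]
  ring

theorem pvPosB_mono (v : Int) : ∀ (n : Nat) (k : Int), 1 ≤ k → k + n ≤ v → pvPosB v k ≤ pvPosB v (k + n) := by
  intro n
  induction n with
  | zero => intro k _ _; simp
  | succ m ih =>
      intro k hk hkv
      have h1 : k + (m : Int) ≤ v := by push_cast at hkv ⊢; omega
      have h2 := ih k hk h1
      have h3 := pvPosB_succ v (k + m)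
      push_cast at hkv ⊢
      rw [show k + ((m : Int) + 1) = (k + m) + 1 by ring, h3]
      omega

-- pvPosB t (k+1) counts one step at velocity t plus k steps at velocity t-1
theorem pvPosB_shift (t k : Int) : pvPosB t (k + 1) = t + pvPosB (t - 1) k := by
  have h1 := pvFd2 k
  have h2 := pvFd2 (k + 1)
  unfold pvPosB
  have harg : (k + 1) * (k + 1 - 1) = (k + 1) * k := by ring
  rw [harg] at h2 ⊢
  ring_nf at h1 h2 ⊢
  linarith

-- characterisation of A's inner loop: true iff some step position lands in range
theorem pvInnerA_iff (xBounds : List Int) : ∀ (n : Nat) (p t : Int), t ≤ n →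
    (pvInnerAGo xBounds n p t = true ↔
      ∃ k : Int, 1 ≤ k ∧ k ≤ t ∧
        PySem.List.pyGetD xBounds 0 0 ≤ p + pvPosB t k ∧
        p + pvPosB t k ≤ PySem.List.pyGetD xBounds 1 0) := by
  intro n
  induction n with
  | zero =>
      intro p t ht
      simp only [pvInnerAGo, Bool.false_eq_true, false_iff]
      rintro ⟨k, hk1, hk2, _⟩
      omega
  | succ m ih =>
      intro p t ht
      by_cases htpos : 0 < t
      · rw [pvInnerAGo, if_pos htpos]
        by_cases hin : PySem.List.pyGetD xBounds 0 0 ≤ p + t ∧ p + t ≤ PySem.List.pyGetD xBounds 1 0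
        · rw [if_pos hin]
          simp only [true_iff]
          exact ⟨1, le_refl 1, by omega, by rw [pvPosB_one]; omega, by rw [pvPosB_one]; omega⟩
        · rw [if_neg hin]
          rw [ih (p + t) (t - 1) (by omega)]
          constructor
          · rintro ⟨k, hk1, hk2, hlo, hhi⟩
            have hs := pvPosB_shift t k
            exact ⟨k + 1, by omega, by omega, by rw [hs]; omega, by rw [hs]; omega⟩
          · rintro ⟨k, hk1, hk2, hlo, hhi⟩
            by_cases hk : k = 1
            · subst hk
              rw [pvPosB_one] at hlo hhi
              exact absurd ⟨hlo, hhi⟩ hin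
            · have hs := pvPosB_shift t (k - 1)
              rw [show (k - 1 : Int) + 1 = k by ring] at hs
              exact ⟨k - 1, by omega, by omega, by omega, by omega⟩
      · rw [pvInnerAGo, if_neg htpos]
        simp only [Bool.false_eq_true, false_iff]
        rintro ⟨k, hk1, hk2, _⟩
        omega

-- binary-search invariant: result is the first index whose position reaches lo
theorem pvBsearch_spec (lo v : Int) : ∀ (n : Nat) (a b : Int), (b - a).toNat ≤ n →
    1 ≤ a → a ≤ b → b ≤ v → lo ≤ pvPosB v b → (∀ j, 1 ≤ j → j < a → pvPosB v j < lo) →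
    (a ≤ pvBsearchGo lo v n a b ∧ pvBsearchGo lo v n a b ≤ b ∧ lo ≤ pvPosB v (pvBsearchGo lo v n a b) ∧
      ∀ j, 1 ≤ j → j < pvBsearchGo lo v n a b → pvPosB v j < lo) := by
  intro n
  induction n with
  | zero =>
      intro a b hn h1 hab hbv hb hbelow
      have heq : a = b := by omega
      subst heq
      exact ⟨le_refl a, le_refl a, hb, hbelow⟩
  | succ m ih =>
      intro a b hn h1 hab hbv hb hbelow
      by_cases hlt : a < b
      · rw [pvBsearchGo, if_pos hlt]
        have hm1 := (PySem.Int.floordiv_two_mid_bounds (lo := a) (hi := b) (by omega)).1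
        have hm2 := (PySem.Int.floordiv_lt_iff_lt_mul (a := a + b) (b := 2) (q := b) (by omega)).mpr (by omega)
        set mid := PySem.Int.floordiv (a + b) 2 with hmid
        by_cases hc : lo ≤ pvPosB v mid
        · rw [if_pos hc]
          obtain ⟨r1, r2, r3, r4⟩ := ih a mid (by omega) h1 (by omega) (by omega) hc hbelow
          exact ⟨r1, by omega, r3, r4⟩
        · rw [if_neg hc]
          have hbelow' : ∀ j, 1 ≤ j → j < mid + 1 → pvPosB v j < lo := by
            intro j hj1 hjm
            by_cases hja : j < a
            · exact hbelow j hj1 hja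
            · have hmono := pvPosB_mono v (mid - j).toNat j hj1 (by omega)
              have : j + ((mid - j).toNat : Int) = mid := by omega
              rw [this] at hmono
              omega
          obtain ⟨r1, r2, r3, r4⟩ := ih (mid + 1) b (by omega) (by omega) (by omega) hbv hb hbelow'
          exact ⟨by omega, r2, r3, r4⟩
      · rw [pvBsearchGo, if_neg hlt]
        have heq : a = b := by omega
        exact ⟨le_refl a, hab, heq ▸ hb, hbelow⟩

-- characterisation of B's _hits: the same exists as A's inner loop (at p = 0)
theorem pvHitsB_iff (xBounds : List Int) (v : Int) :
    (pvHitsB xBounds v = true ↔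
      ∃ k : Int, 1 ≤ k ∧ k ≤ v ∧
        PySem.List.pyGetD xBounds 0 0 ≤ pvPosB v k ∧
        pvPosB v k ≤ PySem.List.pyGetD xBounds 1 0) := by
  simp only [pvHitsB]
  set lo := PySem.List.pyGetD xBounds 0 0 with hlo
  set hi := PySem.List.pyGetD xBounds 1 0 with hhi
  by_cases hv : v ≤ 0
  · rw [if_pos hv]
    simp only [Bool.false_eq_true, false_iff]
    rintro ⟨k, hk1, hk2, _⟩
    omega
  · rw [if_neg hv]
    by_cases hp : pvPosB v v < lo
    · rw [if_pos hp]
      simp only [Bool.false_eq_true, false_iff]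
      rintro ⟨k, hk1, hk2, hklo, _⟩
      have hmono := pvPosB_mono v (v - k).toNat k hk1 (by omega)
      have : k + ((v - k).toNat : Int) = v := by omega
      rw [this] at hmono
      omega
    · rw [if_neg hp]
      have hspec := pvBsearch_spec lo v (v - 1).toNat 1 v (by omega) (le_refl 1) (by omega)
        (le_refl v) (by omega) (by intro j hj1 hj2; omega)
      rw [show pvBsearchGo lo v (v - 1).toNat 1 v = pvBsearch lo v 1 v from rfl] at hspec
      set a := pvBsearch lo v 1 v with ha
      obtain ⟨ha1, hav, halo, hamin⟩ := hspec
      simp only [decide_eq_true_eq]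
      constructor
      · intro h
        exact ⟨a, ha1, hav, halo, h⟩
      · rintro ⟨k, hk1, hk2, hklo, hkhi⟩
        have hak : a ≤ k := by
          by_contra hc
          have := hamin k hk1 (by omega)
          omega
        have hmono := pvPosB_mono v (k - a).toNat a ha1 (by omega)
        have : a + ((k - a).toNat : Int) = k := by omega
        rw [this] at hmono
        omega

-- the two hit tests agree pointwise
theorem pvHit_eq (xBounds : List Int) (v : Int) : pvInnerA xBounds 0 v = pvHitsB xBounds v := by
  have hA := pvInnerA_iff xBounds v.toNat 0 v (by omega)
  have hB := pvHitsB_iff xBounds v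
  rw [show pvInnerAGo xBounds v.toNat 0 v = pvInnerA xBounds 0 v from rfl] at hA
  simp only [zero_add] at hA
  rw [Bool.eq_iff_iff, hA, hB]

-- the two outer loops agree for every fuel
theorem pvLoop_eq (xBounds : List Int) : ∀ (fuel : Nat) (v : Int),
    pvLoopA xBounds fuel v = pvLoopB xBounds fuel v := by
  intro fuel
  induction fuel with
  | zero => intro v; rfl
  | succ n ih =>
      intro v
      simp only [pvLoopA, pvLoopB, pvHit_eq, ih]

-- ===== VERDICT (by name: the statement is the Claim_ definition above) =====
theorem findXVelocityMax_spec : Claim_equal_findXVelocityMax := by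
  intro xBounds xMinV _ _
  unfold Spec_findXVelocityMax findXVelocityMax findXVelocityMax_alt
  exact pvLoop_eq xBounds _ xMinV
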